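-- pv_equiv track=rewrite | github.com/youhannatouma/FYP-hospital-Agent | backend/tools/doctor_matching_tools.py | _infer_specialties
-- ===== SOURCE A (Python) =====
-- _SPECIALTY_HINTS: dict[str, set[str]] = {
--     "pulmonology": {
--         "breath", "breathing", "asthma", "cough", "lung", "wheez", "chest tight",
--     },
--     "cardiology": {
--         "heart", "palpitation", "chest pain", "hypertension", "blood pressure",
--     },
--     "neurology": {
--         "migraine", "headache", "seizure", "numb", "vertigo", "memory",
--     },
--     "dermatology": {
--         "rash", "skin", "itch", "eczema", "acne", "hives",
--     },
--     "gastroenterology": {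
--         "stomach", "abdomen", "nausea", "vomit", "diarrhea", "constipation", "reflux",
--     },
--     "orthopedics": {
--         "joint", "knee", "back pain", "fracture", "sprain", "shoulder",
--     },
--     "psychiatry": {
--         "anxiety", "depression", "panic", "sleep", "insomnia", "stress",
--     },
--     "ent": {
--         "sinus", "ear", "throat", "hearing", "tonsil", "nose",
--     },
--     "general medicine": {
--         "fever", "fatigue", "viral", "infection", "checkup", "general",
--     },
-- }
--
-- def _normalize_text(v: str | None) -> str:
--     return (v or "").strip().lower()
--
-- def _infer_specialties(need_text: str) -> list[str]:
--     q = _normalize_text(need_text)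
--     scores: list[tuple[str, int]] = []
--     for specialty, hints in _SPECIALTY_HINTS.items():
--         matches = sum(1 for h in hints if h in q)
--         if matches:
--             scores.append((specialty, matches))
--     if not scores:
--         return ["general medicine"]
--     scores.sort(key=lambda x: x[1], reverse=True)
--     return [s for s, _ in scores]
-- ===== SOURCE B (Python) =====
-- _SPECIALTY_HINTS: dict[str, set[str]] = {
--     "pulmonology": {
--         "breath", "breathing", "asthma", "cough", "lung", "wheez", "chest tight",
--     },
--     "cardiology": {
--         "heart", "palpitation", "chest pain", "hypertension", "blood pressure",
--     },
--     "neurology": {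
--         "migraine", "headache", "seizure", "numb", "vertigo", "memory",
--     },
--     "dermatology": {
--         "rash", "skin", "itch", "eczema", "acne", "hives",
--     },
--     "gastroenterology": {
--         "stomach", "abdomen", "nausea", "vomit", "diarrhea", "constipation", "reflux",
--     },
--     "orthopedics": {
--         "joint", "knee", "back pain", "fracture", "sprain", "shoulder",
--     },
--     "psychiatry": {
--         "anxiety", "depression", "panic", "sleep", "insomnia", "stress",
--     },
--     "ent": {
--         "sinus", "ear", "throat", "hearing", "tonsil", "nose",
--     },
--     "general medicine": {
--         "fever", "fatigue", "viral", "infection", "checkup", "general",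
--     },
-- }
--
--
-- def _infer_specialties(need_text: str) -> list[str]:
--     # Counting selection instead of sort: walk possible match counts from high
--     # to low and emit specialties in table order, which reproduces the stable
--     # descending sort exactly.
--     q = (need_text or "").strip().lower()
--     counts = {s: sum(h in q for h in hints) for s, hints in _SPECIALTY_HINTS.items()}
--     result = []
--     for c in range(7, 0, -1):  # 7 = size of the largest hint set
--         for s, n in counts.items():
--             if n == c:
--                 result.append(s)
--     return result or ["general medicine"]
-- ===== Notes on version B (the rewrite author's own statement) =====
-- stated objective: alternative
-- what changed: Replaces collecting (specialty, count) pairs and stable-sorting them by count descending with a counting selection: compute each specialty's match count once, then walk the possible counts 7..1 and emit matching specialties in table order, which reproduces the stable descending order without sorting.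
import Mathlib
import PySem

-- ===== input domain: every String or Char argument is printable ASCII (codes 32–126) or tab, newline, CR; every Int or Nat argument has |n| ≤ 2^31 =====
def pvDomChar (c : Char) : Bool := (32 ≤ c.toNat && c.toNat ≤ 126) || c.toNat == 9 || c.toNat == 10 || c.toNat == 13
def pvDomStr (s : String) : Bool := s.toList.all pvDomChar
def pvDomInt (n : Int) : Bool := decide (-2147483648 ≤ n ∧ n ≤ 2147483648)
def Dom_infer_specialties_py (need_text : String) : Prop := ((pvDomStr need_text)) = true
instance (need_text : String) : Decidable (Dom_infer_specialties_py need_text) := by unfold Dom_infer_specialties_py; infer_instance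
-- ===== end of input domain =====

-- B replaces the stable descending sort of (specialty, count) pairs by a counting
-- selection: walk the possible match counts 7..1 and emit matching specialties in
-- table order (objective: alternative, no speed claim on this fixed 9-row table).

-- Shared module-level constant _SPECIALTY_HINTS (each Python set as a list of its
-- distinct elements; only membership counts are taken from it, so order is irrelevant).
def SPECIALTY_HINTS : List (String × List String) := [
  ("pulmonology", ["asthma", "breath", "breathing", "chest tight", "cough", "lung", "wheez"]),
  ("cardiology", ["blood pressure", "chest pain", "heart", "hypertension", "palpitation"]),
  ("neurology", ["headache", "memory", "migraine", "numb", "seizure", "vertigo"]),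
  ("dermatology", ["acne", "eczema", "hives", "itch", "rash", "skin"]),
  ("gastroenterology", ["abdomen", "constipation", "diarrhea", "nausea", "reflux", "stomach", "vomit"]),
  ("orthopedics", ["back pain", "fracture", "joint", "knee", "shoulder", "sprain"]),
  ("psychiatry", ["anxiety", "depression", "insomnia", "panic", "sleep", "stress"]),
  ("ent", ["ear", "hearing", "nose", "sinus", "throat", "tonsil"]),
  ("general medicine", ["checkup", "fatigue", "fever", "general", "infection", "viral"])]

-- ===== PORT A =====
def infer_specialties_py (need_text : String) : List String :=
  let q := PySem.Str.lower (PySem.Str.strip need_text)   -- _normalize_text (need_text is a str, so 'v or ""' is the identity on it)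
  let scores : List (String × Int) := SPECIALTY_HINTS.foldl
    (fun acc sh =>
      let m : Int := (sh.2.map (fun h => if PySem.Str.isIn h q then (1 : Int) else 0)).sum
      if m ≠ 0 then acc ++ [(sh.1, m)] else acc) []
  if scores = [] then ["general medicine"]
  else (PySem.List.sorted scores (fun x => x.2) true).map (fun x => x.1)

-- ===== PORT B =====
def infer_specialties_py_alt (need_text : String) : List String :=
  let q := PySem.Str.lower (PySem.Str.strip need_text)
  let counts : List (String × Int) :=
    SPECIALTY_HINTS.map (fun sh => (sh.1, ((sh.2.countP (fun h => PySem.Str.isIn h q) : Nat) : Int)))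
  let result := (PySem.List.pyRange 7 0 (-1)).flatMap
    (fun c => (counts.filter (fun sn => sn.2 == c)).map (fun sn => sn.1))
  if result = [] then ["general medicine"] else result

-- ===== PRECONDITION & SPEC =====
def Spec_infer_specialties_py (need_text : String) (out : List String) : Prop := out = infer_specialties_py_alt need_text
instance (need_text : String) (out : List String) : Decidable (Spec_infer_specialties_py need_text out) := by unfold Spec_infer_specialties_py; infer_instance

-- ===== CLAIM (what is proved, stated in full; the proofs are below) =====
def Claim_equal_infer_specialties_py : Prop := ∀ (need_text : String), Dom_infer_specialties_py need_text → Spec_infer_specialties_py need_text (infer_specialties_py need_text)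

-- ===== LEMMAS AND PROOFS =====

-- the per-specialty match count
def cnt (q : String) (hs : List String) : Int :=
  ((hs.countP (fun h => PySem.Str.isIn h q) : Nat) : Int)

theorem cnt_nonneg (q : String) (hs : List String) : 0 ≤ cnt q hs := Int.natCast_nonneg _

theorem cnt_le_len (q : String) (hs : List String) : cnt q hs ≤ (hs.length : Int) := by
  unfold cnt; exact_mod_cast List.countP_le_length

-- insertBy passes over a block it is not "before" any element of
theorem insertBy_append_not {α : Type} (before : α → α → Bool) (x : α) (as bs : List α)
    (h : ∀ a ∈ as, before x a = false) :
    PySem.List.insertBy before x (as ++ bs) = as ++ PySem.List.insertBy before x bs := by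
  induction as with
  | nil => simp
  | cons a as ih =>
    have ha : before x a = false := h a (List.mem_cons_self ..)
    simp only [List.cons_append, PySem.List.insertBy, ha]
    simp only [Bool.false_eq_true, if_false]
    exact congrArg (a :: ·) (ih fun a' ha' => h a' (List.mem_cons_of_mem _ ha'))

-- insertBy stops at the front of a block it is "before" every element of
theorem insertBy_forall_before {α : Type} (before : α → α → Bool) (x : α) (ys : List α)
    (h : ∀ y ∈ ys, before x y = true) :
    PySem.List.insertBy before x ys = x :: ys := by
  cases ys with
  | nil => rfl
  | cons y ys => simp [PySem.List.insertBy, h y (List.mem_cons_self ..)]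

-- inserting into a list bucketed by strictly descending keys appends to x's bucket
theorem insertBy_buckets {α : Type} (key : α → Int) (x : α) (cs : List Int) (g : Int → List α)
    (hcs : cs.Pairwise (· > ·)) (hk : key x ∈ cs)
    (hg : ∀ c ∈ cs, ∀ y ∈ g c, key y = c) :
    PySem.List.insertBy (fun a b => decide (key b < key a)) x (cs.flatMap g)
      = cs.flatMap (fun c => g c ++ if key x = c then [x] else []) := by
  induction cs with
  | nil => cases hk
  | cons c cs ih =>
    have hgc : ∀ y ∈ g c, key y = c := hg c (List.mem_cons_self ..)
    have hpw : ∀ c' ∈ cs, c' < c := fun c' hc' => (List.pairwise_cons.1 hcs).1 c' hc'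
    simp only [List.flatMap_cons]
    by_cases h : key x = c
    · have h1 : ∀ y ∈ g c, decide (key y < key x) = false := by
        intro y hy; simp [hgc y hy, h]
      rw [insertBy_append_not _ _ _ _ h1]
      have h2 : ∀ y ∈ cs.flatMap g, decide (key y < key x) = true := by
        intro y hy
        obtain ⟨c', hc', hy'⟩ := List.mem_flatMap.1 hy
        have := hg c' (List.mem_cons_of_mem _ hc') y hy'
        simp [this, h, hpw c' hc']
      rw [insertBy_forall_before _ _ _ h2]
      have h3 : cs.flatMap (fun c' => g c' ++ if key x = c' then [x] else []) = cs.flatMap g := by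
        apply List.flatMap_congr
        intro c' hc'
        have : key x ≠ c' := by have := hpw c' hc'; omega
        simp [this]
      rw [h3, if_pos h]
      simp
    · have hk' : key x ∈ cs := by
        rcases List.mem_cons.1 hk with h' | h'
        · exact absurd h' h
        · exact h'
      have h1 : ∀ y ∈ g c, decide (key y < key x) = false := by
        intro y hy
        have hy' := hgc y hy
        have := hpw _ hk'
        simp [hy']; omega
      rw [insertBy_append_not _ _ _ _ h1,
        ih (List.pairwise_cons.1 hcs).2 hk' (fun c' hc' => hg c' (List.mem_cons_of_mem _ hc')),
        if_neg h]
      simp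

-- Python's stable reverse sort of a list whose keys all lie in the strictly
-- descending list cs is exactly the concatenation of its key-buckets
theorem sorted_rev_buckets {α : Type} (xs : List α) (key : α → Int) (cs : List Int)
    (hcs : cs.Pairwise (· > ·)) (hmem : ∀ x ∈ xs, key x ∈ cs) :
    PySem.List.sorted xs key true = cs.flatMap (fun c => xs.filter (fun x => key x == c)) := by
  rw [PySem.List.sorted_rev_eq_foldl_insertBy]
  induction xs using List.reverseRecOn with
  | nil => simp
  | append_singleton ys x ih =>
    rw [List.foldl_append, List.foldl_cons, List.foldl_nil,
      ih (fun y hy => hmem y (List.mem_append_left _ hy))]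
    rw [insertBy_buckets key x cs _ hcs (hmem x (List.mem_append_right _ (List.mem_cons_self ..)))
      (fun c _ y hy => by simpa using (List.mem_filter.1 hy).2)]
    apply List.flatMap_congr
    intro c _
    by_cases h : key x = c <;> simp [List.filter_append, h]

def DESC : List Int := [7, 6, 5, 4, 3, 2, 1]

theorem mem_DESC_of_cnt (q : String) (hs : List String) (hlen : hs.length ≤ 7)
    (hne : cnt q hs ≠ 0) : cnt q hs ∈ DESC := by
  have h1 := cnt_nonneg q hs
  have h2 := cnt_le_len q hs
  have h7 : (hs.length : Int) ≤ 7 := by exact_mod_cast hlen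
  simp only [DESC, List.mem_cons, List.not_mem_nil, or_false]
  omega

theorem hints_len_le : ∀ sh ∈ SPECIALTY_HINTS, sh.2.length ≤ 7 := by decide

-- the accumulation loop of A builds the filtered, counted table
theorem scoresA_eq (q : String) (l : List (String × List String)) (acc : List (String × Int)) :
    l.foldl (fun acc sh =>
        let m : Int := (sh.2.map (fun h => if PySem.Str.isIn h q then (1 : Int) else 0)).sum
        if m ≠ 0 then acc ++ [(sh.1, m)] else acc) acc
      = acc ++ (l.filter (fun sh => !(cnt q sh.2 == 0))).map (fun sh => (sh.1, cnt q sh.2)) := by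
  induction l generalizing acc with
  | nil => simp
  | cons sh l ih =>
    have hm : (List.map (fun h => if PySem.Str.isIn h q = true then (1 : Int) else 0) sh.2).sum
        = cnt q sh.2 := PySem.List.sum_map_ite_one_zero _ _
    simp only [List.foldl_cons, List.filter_cons, hm]
    by_cases h : cnt q sh.2 = 0
    · rw [if_neg (by omega), if_neg (by simp [h]), ih]
    · rw [if_pos (by omega), if_pos (by simp [h]), ih]
      simp

-- both branches' payload: the bucketed output over DESC
theorem filter_counts_eq (q : String) (c : Int) (hc : c ≠ 0) :
    ((SPECIALTY_HINTS.filter (fun sh => !(cnt q sh.2 == 0))).map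
        (fun sh => (sh.1, cnt q sh.2))).filter (fun x => x.2 == c)
      = (SPECIALTY_HINTS.map (fun sh => (sh.1, cnt q sh.2))).filter (fun x => x.2 == c) := by
  rw [List.filter_map, List.filter_map, List.filter_filter]
  congr 1
  apply List.filter_congr
  intro sh _
  simp only [Function.comp]
  by_cases h : cnt q sh.2 = c
  · simp [h, hc]
  · simp [h]

theorem infer_specialties_eq (q : String) :
    (let scores : List (String × Int) := SPECIALTY_HINTS.foldl
        (fun acc sh =>
          let m : Int := (sh.2.map (fun h => if PySem.Str.isIn h q then (1 : Int) else 0)).sum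
          if m ≠ 0 then acc ++ [(sh.1, m)] else acc) []
      if scores = [] then ["general medicine"]
      else (PySem.List.sorted scores (fun x => x.2) true).map (fun x => x.1))
    = (let counts : List (String × Int) :=
        SPECIALTY_HINTS.map (fun sh => (sh.1, ((sh.2.countP (fun h => PySem.Str.isIn h q) : Nat) : Int)))
      let result := (PySem.List.pyRange 7 0 (-1)).flatMap
        (fun c => (counts.filter (fun sn => sn.2 == c)).map (fun sn => sn.1))
      if result = [] then ["general medicine"] else result) := by
  simp only [scoresA_eq q SPECIALTY_HINTS [], List.nil_append]
  have hrange : PySem.List.pyRange 7 0 (-1) = DESC := by decide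
  have hdesc : DESC.Pairwise (· > ·) := by decide
  set scores := (SPECIALTY_HINTS.filter (fun sh => !(cnt q sh.2 == 0))).map
    (fun sh => (sh.1, cnt q sh.2)) with hscores
  have hmem : ∀ x ∈ scores, x.2 ∈ DESC := by
    intro x hx
    obtain ⟨sh, hsh, rfl⟩ := List.mem_map.1 hx
    have h0 : cnt q sh.2 ≠ 0 := by
      have := (List.mem_filter.1 hsh).2; simpa using this
    exact mem_DESC_of_cnt q sh.2 (hints_len_le sh (List.mem_filter.1 hsh).1) h0
  have hbuckets : (PySem.List.sorted scores (fun x => x.2) true).map (fun x => x.1)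
      = DESC.flatMap (fun c =>
          ((SPECIALTY_HINTS.map (fun sh => (sh.1, cnt q sh.2))).filter
            (fun x => x.2 == c)).map (fun x => x.1)) := by
    rw [sorted_rev_buckets scores (fun x => x.2) DESC hdesc hmem, List.map_flatMap]
    apply List.flatMap_congr
    intro c hc
    have hc0 : c ≠ 0 := by
      simp only [DESC, List.mem_cons, List.not_mem_nil, or_false] at hc; omega
    rw [hscores, filter_counts_eq q c hc0]
  have hnil : scores = [] ↔
      (PySem.List.pyRange 7 0 (-1)).flatMap (fun c =>
        ((SPECIALTY_HINTS.map (fun sh => (sh.1, cnt q sh.2))).filter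
          (fun sn => sn.2 == c)).map (fun sn => sn.1)) = [] := by
    rw [hrange]
    constructor
    · intro h
      apply List.flatMap_eq_nil_iff.2
      intro c hc
      have hc0 : c ≠ 0 := by
        simp only [DESC, List.mem_cons, List.not_mem_nil, or_false] at hc; omega
      have hfe : ∀ sh ∈ SPECIALTY_HINTS, cnt q sh.2 = 0 := by
        intro sh hsh
        by_contra h0
        have : (sh.1, cnt q sh.2) ∈ scores := by
          rw [hscores]
          exact List.mem_map.2 ⟨sh, List.mem_filter.2 ⟨hsh, by simpa using h0⟩, rfl⟩
        simp [h] at this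
      have : (SPECIALTY_HINTS.map (fun sh => (sh.1, cnt q sh.2))).filter
          (fun x => x.2 == c) = [] := by
        apply List.filter_eq_nil_iff.2
        intro x hx
        obtain ⟨sh, hsh, rfl⟩ := List.mem_map.1 hx
        simp [hfe sh hsh, Ne.symm hc0]
      simp [this]
    · intro h
      rw [hscores]
      simp only [List.map_eq_nil_iff, List.filter_eq_nil_iff]
      intro sh hsh
      by_contra h0
      have hc : cnt q sh.2 ∈ DESC :=
        mem_DESC_of_cnt q sh.2 (hints_len_le sh hsh) (by simpa using h0)
      have hmm : (sh.1, cnt q sh.2) ∈ (SPECIALTY_HINTS.map (fun sh => (sh.1, cnt q sh.2))).filter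
          (fun x => x.2 == (cnt q sh.2)) :=
        List.mem_filter.2 ⟨List.mem_map.2 ⟨sh, hsh, rfl⟩, by simp⟩
      have hmap := List.flatMap_eq_nil_iff.1 h _ hc
      rw [List.map_eq_nil_iff] at hmap
      rw [hmap] at hmm
      simp at hmm
  simp only [cnt] at hbuckets hnil
  by_cases h : scores = []
  · rw [if_pos h, if_pos ((hnil.1 h))]
  · rw [if_neg h, if_neg (fun hr => h (hnil.2 hr))]
    rw [hbuckets, hrange]

-- ===== VERDICT (by name: the statement is the Claim_ definition above) =====
theorem infer_specialties_py_spec : Claim_equal_infer_specialties_py := by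
  intro need_text _
  unfold Spec_infer_specialties_py infer_specialties_py infer_specialties_py_alt
  exact infer_specialties_eq (PySem.Str.lower (PySem.Str.strip need_text))
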